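-- pv_equiv track=rewrite | github.com/JayKay0104/ma-atl-for-er | code/filtering/help_functions.py | getAlignedDataTypeSchema
-- ===== SOURCE A (Python) =====
-- from collections import defaultdict
--
-- def getAlignedDataTypeSchema(types_dict_list, number_ds):
--     """
--     This function takes as input a list of dictionaries that contain as keys the column of each dataset and as
--     corresponding value the data type for that column (output of function getDataType(df).
--     Besides that, one can optionally pass as second argument a list of column names that act as ids among all datasets
--     and hence can be removed from the dictionary.
--     The output is the final type_per_column dictionary that is required in order to create the labeled feature
--     vector with createLabeledFeatureVector()
--     """
--     #ids_to_be_removed = set(lst_of_ids_to_be_removed)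
--     lst = []
--     aligned_types_lst = []
--     for types_dict in types_dict_list:
--         keys = ['_'.join(s.split('_')[1:]) for s in list(types_dict.keys())]
--         values = types_dict.values()
--         lst.append(tuple(zip(keys,values)))
--         aligned_types_lst.append(dict(zip(keys,values)))
--     lst = [item for sublist in lst for item in sublist]
--
--     d = defaultdict(list)
--
--     for k, *v in lst:
--         d[k].append(v)
--
--     final_data_type_dict = {}
--     d = dict(d)
--     for key in d:
--         d[key] = [k for sublst in d[key] for k in sublst]
--         if 'long_str' in d[key]:
--             # if at least one data source has long string for a attribute assign long_string
--             final_data_type_dict.update({key:'long_str'})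
--         elif len(set(d[key]))>1:
--             # if more than two different datatypes were detected but not long_str and str assign str
--             final_data_type_dict.update({key:'str'})
--         else:
--             # if only one then perfect ;)
--             final_data_type_dict.update({key:d[key][0]})
--
-- #    wrong_format = removeElements(lst,number_ds,less_than_k=True)
-- #    logger.debug('wrong format: '.format(wrong_format))
-- #
-- #    if(len(wrong_format)>0):
-- #        for i in range(len(wrong_format)):
-- #            key = wrong_format[i][0]
-- #            logger.info('Different Format for {}'.format(key))
-- #            key_value_lst = []
-- #            for types_dict in aligned_types_lst:
-- #                key_value_lst.append(types_dict[key])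
-- #            key_value_set = set(key_value_lst)
-- #            if(wrong_format[i][1] == 'str' and 'long_str' in [i for i in key_value_set]):
-- #                final_data_type_dict = dict((set(removeElements(lst,2)))) # basically removes duplicates so that one type per column is assigned
-- #                logger.info('For {} at least one colum has str instead of long_str. But take majority.'.format(key))
-- #            elif(wrong_format[i][1] == 'long_str' and 'str' in [i for i in key_value_set]):
-- #                final_data_type_dict = dict((set(removeElements(lst,2)))) # basically removes duplicates so that one type per column is assigned
-- #                logger.info('For {} at least one colum has long_str instead of str. But take majority.'.format(key))
-- #            else:
-- #                logger.info('For attribute {} the type {} is not compatible with {} '.format(key, wrong_format[i][1], key_value_set))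
-- #                logger.info('No Dictionary with Data Type per Column can be returned. Align schema and format of correpsonding columns first!')
-- #                return None
-- #    else:
-- #        final_data_type_dict = dict(set(removeElements(lst,number_ds)))
-- ##        if(len(ids_to_be_removed)>0):
-- ##            for item in ids_to_be_removed:
-- ##                final_data_type_dict.pop(item,None)
-- #    logger.info('type_per_column dictionary returned')
--     return final_data_type_dict
-- ===== SOURCE B (Python) =====
-- def getAlignedDataTypeSchema(types_dict_list, number_ds):
--     # No grouping container at all: flatten the (stripped column, type) stream
--     # once, then for each column at its first occurrence rescan the stream to
--     # collect that column's types and classify them on the spot.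
--     pairs = [('_'.join(k.split('_')[1:]), v)
--              for td in types_dict_list for k, v in td.items()]
--     out = {}
--     for col, _ in pairs:
--         if col not in out:
--             types = [v for c, v in pairs if c == col]
--             if 'long_str' in types:
--                 out[col] = 'long_str'
--             elif len(set(types)) > 1:
--                 out[col] = 'str'
--             else:
--                 out[col] = types[0]
--     return out
-- ===== Notes on version B (the rewrite author's own statement) =====
-- stated objective: alternative
-- what changed: A materializes per-dict key/value zips, flattens them, groups values per stripped column into a defaultdict of lists and then classifies each group; B keeps no grouping structure: it flattens the pair stream once and, at each column's first occurrence, rescans the whole stream to collect that column's types and classifies immediately (recompute-per-key nested scan instead of hashed grouping).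
import Mathlib
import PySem

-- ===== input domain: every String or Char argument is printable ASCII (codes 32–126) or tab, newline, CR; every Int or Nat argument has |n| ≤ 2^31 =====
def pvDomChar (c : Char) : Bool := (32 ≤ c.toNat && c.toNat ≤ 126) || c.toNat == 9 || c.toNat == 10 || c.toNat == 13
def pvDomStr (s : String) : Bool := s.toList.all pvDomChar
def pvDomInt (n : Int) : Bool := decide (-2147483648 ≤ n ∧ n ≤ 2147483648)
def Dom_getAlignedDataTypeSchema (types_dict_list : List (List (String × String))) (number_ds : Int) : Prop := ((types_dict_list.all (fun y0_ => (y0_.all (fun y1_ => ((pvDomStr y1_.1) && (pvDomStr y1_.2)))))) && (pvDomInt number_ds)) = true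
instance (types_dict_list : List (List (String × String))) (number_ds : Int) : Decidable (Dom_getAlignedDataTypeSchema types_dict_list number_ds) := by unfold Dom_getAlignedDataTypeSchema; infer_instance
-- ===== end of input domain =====

-- B drops A's grouping structures entirely: it flattens the (stripped column, type) stream once
-- and, at each column's first occurrence, rescans the stream to collect and classify its types.

-- '_'.join(s.split('_')[1:])  (shared by both Pythons verbatim)
def pvStrip (s : String) : String :=
  PySem.Str.join "_" (PySem.List.slice ((PySem.Str.split? s "_").getD []) (some 1) none)

-- ===== PORT A =====
-- Note: Python's 'for k, *v in lst: d[k].append(v)' wraps each value in a singleton list that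
-- the very next pass flattens back; the port appends the value itself (same grouped values).
def getAlignedDataTypeSchema (types_dict_list : List (List (String × String))) (number_ds : Int) : List (String × String) :=
  let lst : List (List (String × String)) := types_dict_list.foldl (fun acc td =>
    let d := PySem.Dict.ofList td
    acc ++ [((d.keys.map pvStrip).zip d.values)]) []
  let flat := lst.flatten
  let g : PySem.Dict String (List String) :=
    flat.foldl (fun d p => d.modify p.1 [] (fun l => l ++ [p.2])) PySem.Dict.empty
  let final : PySem.Dict String String := g.items.foldl (fun fd p =>
    if p.2.contains "long_str" then fd.insert p.1 "long_str"
    else if 1 < PySem.Set.len (PySem.Set.ofList p.2) then fd.insert p.1 "str"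
    else fd.insert p.1 (PySem.List.pyGetD p.2 0 "")) PySem.Dict.empty
  final.items

-- ===== PORT B =====
-- 'types[0]' is ported as pyGetD types 0 "": types is nonempty whenever the branch runs
-- (col was taken from pairs itself), so the default is never used where Python returns.
def getAlignedDataTypeSchema_alt (types_dict_list : List (List (String × String))) (number_ds : Int) : List (String × String) :=
  let pairs : List (String × String) :=
    (types_dict_list.map (fun td =>
      (PySem.Dict.ofList td).items.map (fun q => (pvStrip q.1, q.2)))).flatten
  let out : PySem.Dict String String := pairs.foldl (fun out p =>
    if out.contains p.1 then out
    else
      let types := (pairs.filter (fun q => q.1 == p.1)).map (·.2)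
      if types.contains "long_str" then out.insert p.1 "long_str"
      else if 1 < PySem.Set.len (PySem.Set.ofList types) then out.insert p.1 "str"
      else out.insert p.1 (PySem.List.pyGetD types 0 "")) PySem.Dict.empty
  out.items

-- ===== PRECONDITION & SPEC =====
def Spec_getAlignedDataTypeSchema (types_dict_list : List (List (String × String))) (number_ds : Int) (out : List (String × String)) : Prop := out = getAlignedDataTypeSchema_alt types_dict_list number_ds
instance (types_dict_list : List (List (String × String))) (number_ds : Int) (out : List (String × String)) : Decidable (Spec_getAlignedDataTypeSchema types_dict_list number_ds out) := by unfold Spec_getAlignedDataTypeSchema; infer_instance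

-- ===== CLAIM =====
def Claim_equal_getAlignedDataTypeSchema : Prop := ∀ (types_dict_list : List (List (String × String))) (number_ds : Int), Dom_getAlignedDataTypeSchema types_dict_list number_ds → Spec_getAlignedDataTypeSchema types_dict_list number_ds (getAlignedDataTypeSchema types_dict_list number_ds)

-- ===== LEMMAS AND PROOFS =====

-- the stream of (stripped column, type) pairs both programs process, in order
def pvPairs (types_dict_list : List (List (String × String))) : List (String × String) :=
  (types_dict_list.map (fun td => (PySem.Dict.ofList td).items.map (fun q => (pvStrip q.1, q.2)))).flatten

-- the types recorded for column c in stream l, and the shared classification of a type list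
def pvGroup (l : List (String × String)) (c : String) : List String :=
  (l.filter (fun q => q.1 == c)).map (·.2)

def pvValA (L : List String) : String :=
  if L.contains "long_str" then "long_str"
  else if 1 < PySem.Set.len (PySem.Set.ofList L) then "str"
  else PySem.List.pyGetD L 0 ""

-- A's grouping step
def pvGroupStep (d : PySem.Dict String (List String)) (p : String × String) : PySem.Dict String (List String) :=
  d.modify p.1 [] (fun l => l ++ [p.2])

theorem pv_filter_discard (s : List String) (x : String) (p : String → Bool) (hx : p x = false) :
    (PySem.Set.discard s x).filter p = s.filter p := by
  unfold PySem.Set.discard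
  rw [List.filter_filter]
  apply List.filter_congr
  intro a _
  by_cases h : a = x
  · subst h; simp [hx]
  · simp [h]

-- B's skip-if-seen loop over the stream, for a value that depends only on the key
theorem pv_bfold (v : String → String) (l : List (String × String)) (d : PySem.Dict String String) :
    (l.foldl (fun d p => if d.contains p.1 then d else d.insert p.1 (v p.1)) d).items
      = d.items ++ ((PySem.Set.ofList (l.map (·.1))).filter
          (fun c => !(d.contains c))).map (fun c => (c, v c)) := by
  induction l generalizing d with
  | nil => simp
  | cons p l ih =>
    simp only [List.foldl_cons, List.map_cons, PySem.Set.ofList_cons]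
    by_cases hc : d.contains p.1
    · rw [if_pos hc, ih d, List.filter_cons_of_neg (by simp [hc]),
        pv_filter_discard _ _ _ (by simp [hc])]
    · rw [if_neg hc, ih (d.insert p.1 (v p.1)),
        PySem.Dict.items_insert_of_not_contains d _ (by simpa using hc),
        List.filter_cons_of_pos (by simp [hc])]
      have hfil : (PySem.Set.ofList (l.map (·.1))).filter
            (fun c => !((d.insert p.1 (v p.1)).contains c))
          = ((PySem.Set.ofList (l.map (·.1))).discard p.1).filter (fun c => !(d.contains c)) := by
        unfold PySem.Set.discard
        rw [List.filter_filter]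
        apply List.filter_congr
        intro a _
        rw [PySem.Dict.contains_insert]
        by_cases h : a = p.1
        · subst h; simp
        · simp [Bool.and_comm]
      rw [hfil]
      simp [List.append_assoc]

-- ===== VERDICT =====
theorem getAlignedDataTypeSchema_spec : Claim_equal_getAlignedDataTypeSchema := by
  intro tdl number_ds _
  unfold Spec_getAlignedDataTypeSchema
  -- characterisation of A's grouped dict over the shared stream P := pvPairs tdl
  have hkeys : ((pvPairs tdl).foldl pvGroupStep PySem.Dict.empty).keys
      = PySem.Set.ofList ((pvPairs tdl).map (·.1)) := by
    show ((pvPairs tdl).foldl (fun d p => d.modify p.1 [] ((fun _ p => fun l => l ++ [p.2]) d p)) PySem.Dict.empty).keys = _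
    rw [PySem.Dict.keys_foldl_modify_key (pvPairs tdl) (·.1) [] (fun _ p => fun l => l ++ [p.2])]
    simp [PySem.Set.update_nil_left]
  have hnd : ((pvPairs tdl).foldl pvGroupStep PySem.Dict.empty).keys.Nodup := by
    rw [hkeys]; exact PySem.Set.nodup_ofList _
  have hg_items : ((pvPairs tdl).foldl pvGroupStep PySem.Dict.empty).items
      = (PySem.Set.ofList ((pvPairs tdl).map (·.1))).map (fun c => (c, pvGroup (pvPairs tdl) c)) := by
    rw [PySem.Dict.items_eq_map_keys _ hnd [], hkeys]
    apply List.map_congr_left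
    intro c _
    have h := PySem.Dict.getD_foldl_modify_append (pvPairs tdl)
      (PySem.Dict.empty (κ := String) (ν := List String)) c
    unfold pvGroupStep
    rw [h]
    simp [pvGroup]
  -- B equals the classification map over the distinct columns
  have hB : getAlignedDataTypeSchema_alt tdl number_ds
      = (PySem.Set.ofList ((pvPairs tdl).map (·.1))).map
          (fun c => (c, pvValA (pvGroup (pvPairs tdl) c))) := by
    unfold getAlignedDataTypeSchema_alt
    dsimp only
    rw [show ((tdl.map (fun td =>
        (PySem.Dict.ofList td).items.map (fun q => (pvStrip q.1, q.2)))).flatten) = pvPairs tdl from rfl]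
    have hBbody : (fun (out : PySem.Dict String String) (p : String × String) =>
        if out.contains p.1 then out
        else
          if (((pvPairs tdl).filter (fun q => q.1 == p.1)).map (·.2)).contains "long_str" then
            out.insert p.1 "long_str"
          else if 1 < PySem.Set.len (PySem.Set.ofList
              (((pvPairs tdl).filter (fun q => q.1 == p.1)).map (·.2))) then out.insert p.1 "str"
          else out.insert p.1
            (PySem.List.pyGetD (((pvPairs tdl).filter (fun q => q.1 == p.1)).map (·.2)) 0 ""))
        = (fun out p => if out.contains p.1 then out
            else out.insert p.1 ((fun c => pvValA (pvGroup (pvPairs tdl) c)) p.1)) := by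
      funext out p
      unfold pvValA pvGroup
      dsimp only
      split_ifs <;> rfl
    rw [hBbody, pv_bfold (fun c => pvValA (pvGroup (pvPairs tdl) c)) (pvPairs tdl) PySem.Dict.empty]
    simp
    rfl
  rw [hB]
  -- A reduces to the same map
  unfold getAlignedDataTypeSchema
  dsimp only
  have hflat : (tdl.foldl (fun acc td =>
      acc ++ [(((PySem.Dict.ofList td).keys.map pvStrip).zip (PySem.Dict.ofList td).values)]) []).flatten
      = pvPairs tdl := by
    rw [PySem.List.foldl_append_singleton_eq_map
      (fun td => (((PySem.Dict.ofList td).keys.map pvStrip).zip (PySem.Dict.ofList td).values))]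
    unfold pvPairs
    simp only [List.nil_append]
    congr 1
    apply List.map_congr_left
    intro td _
    show ((((PySem.Dict.ofList td).items.map (·.1)).map pvStrip).zip
        ((PySem.Dict.ofList td).items.map (·.2))) = _
    rw [List.map_map, List.zip_map']
    rfl
  rw [hflat]
  have hbody : (fun (fd : PySem.Dict String String) (p : String × List String) =>
      if p.2.contains "long_str" then fd.insert p.1 "long_str"
      else if 1 < PySem.Set.len (PySem.Set.ofList p.2) then fd.insert p.1 "str"
      else fd.insert p.1 (PySem.List.pyGetD p.2 0 ""))
      = (fun fd p => fd.insert p.1 (pvValA p.2)) := by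
    funext fd p
    unfold pvValA
    split_ifs <;> rfl
  rw [show (fun (d : PySem.Dict String (List String)) (p : String × String) =>
      d.modify p.1 [] fun l => l ++ [p.2]) = pvGroupStep from rfl]
  rw [hbody]
  rw [PySem.Dict.items_foldl_insert_fresh
    (((pvPairs tdl).foldl pvGroupStep PySem.Dict.empty).items) (fun p => p.1) (fun p => pvValA p.2)
    PySem.Dict.empty (by intro a _; simp) (by exact hnd)]
  rw [hg_items, List.map_map]
  rfl
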